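-- pv_equiv track=rewrite | github.com/San-Leandro-High-Makers-Club/pie-2021-archive | challenges/challenges.py | reverse_lower
-- ===== SOURCE A (Python) =====
-- def reverse_lower(string):
--     parse = [char for char in string]
--     item, item_2, item_3 = [], [], []
--     word = ""
--
--     for index, letter in enumerate(parse):
--         if letter.islower():
--             item.append(letter)
--             item_2.append(index)
--     item_2.reverse()
--     for i in range(0, len(item)):
--         item_3.append([item[i], item_2[i]])
--
--     for i in range(0, len(item_3)):
--         parse.pop(item_3[i][1])
--         parse.insert(item_3[i][1], item_3[i][0])
--
--     return word.join(parse)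
-- ===== SOURCE B (Python) =====
-- def reverse_lower(string):
--     stack = [c for c in string if c.islower()]
--     out = []
--     for ch in string:
--         out.append(stack.pop() if ch.islower() else ch)
--     return "".join(out)
-- ===== Notes on version B (the rewrite author's own statement) =====
-- stated objective: faster
-- what changed: B makes one pass over the string consuming a stack of the lowercase letters from its end, instead of A's three passes building parallel letter/index lists and placing letters by positional O(n) pop/insert.
import Mathlib
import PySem

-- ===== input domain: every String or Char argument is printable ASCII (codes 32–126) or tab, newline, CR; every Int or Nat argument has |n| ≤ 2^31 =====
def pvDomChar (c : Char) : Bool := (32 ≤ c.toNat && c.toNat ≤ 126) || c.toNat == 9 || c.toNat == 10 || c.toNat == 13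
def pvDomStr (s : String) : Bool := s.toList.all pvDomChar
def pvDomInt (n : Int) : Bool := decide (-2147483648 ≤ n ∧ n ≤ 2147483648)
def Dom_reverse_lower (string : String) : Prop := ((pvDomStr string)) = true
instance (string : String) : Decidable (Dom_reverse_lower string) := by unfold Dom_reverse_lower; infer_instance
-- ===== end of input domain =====

-- B reverses the lowercase letters with a single pass consuming a stack of them, instead of A's
-- parallel letter/index lists and positional pop/insert placement (objective: faster, O(n) vs O(n^2)).

-- ===== PORT A =====
def reverse_lower (string : String) : String :=
  let parse := string.toList
  let st := (PySem.List.enumerate parse 0).foldl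
      (fun (acc : List Char × List Int) p =>
        if PySem.Chars.islower p.2 then (acc.1 ++ [p.2], acc.2 ++ [p.1]) else acc)
      ([], [])
  let item := st.1
  let item_2 := st.2.reverse
  let item_3 := (PySem.List.pyRange 0 (PySem.List.len item) 1).foldl
      (fun acc i => acc ++ [(PySem.List.pyGetD item i ' ', PySem.List.pyGetD item_2 i (0 : Int))]) []
  let parse := (PySem.List.pyRange 0 (PySem.List.len item_3) 1).foldl
      (fun parse i =>
        let pr := PySem.List.pyGetD item_3 i (' ', (0 : Int))
        match PySem.List.pop? parse pr.2 with
        | some (_, rest) => PySem.List.insert rest pr.2 pr.1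
        | none => parse)   -- unreachable: the popped index is always in range
      parse
  String.ofList parse

-- ===== PORT B =====
-- the 'for ch in string' loop with its mutable stack, as structural recursion
def pvAltGo : List Char → List Char → List Char
  | [], _ => []
  | c :: rest, stack =>
    if PySem.Chars.islower c then
      match PySem.List.pop? stack (-1) with
      | some (x, stack') => x :: pvAltGo rest stack'
      | none => c :: pvAltGo rest stack   -- unreachable: stack is nonempty at lowercase positions
    else c :: pvAltGo rest stack

def reverse_lower_alt (string : String) : String :=
  let stack := string.toList.filter (fun c => PySem.Chars.islower c)
  String.ofList (pvAltGo string.toList stack)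

-- ===== PRECONDITION & SPEC =====
def Spec_reverse_lower (string : String) (out : String) : Prop := out = reverse_lower_alt string
instance (string : String) (out : String) : Decidable (Spec_reverse_lower string out) := by unfold Spec_reverse_lower; infer_instance

-- ===== CLAIM (what is proved, stated in full; the proofs are below) =====
def Claim_equal_reverse_lower : Prop := ∀ (string : String), Dom_reverse_lower string → Spec_reverse_lower string (reverse_lower string)

-- ===== LEMMAS AND PROOFS =====

-- indices (from 0) of the lowercase letters of a list
def pvLowIdx : List Char → List Int
  | [] => []
  | c :: t => if PySem.Chars.islower c then 0 :: (pvLowIdx t).map (· + 1) else (pvLowIdx t).map (· + 1)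

-- reference function: walk the list, consuming vs from the front at lowercase positions
def pvFrontGo : List Char → List Char → List Char
  | [], _ => []
  | c :: t, vs =>
    if PySem.Chars.islower c then
      match vs with
      | x :: vs' => x :: pvFrontGo t vs'
      | [] => c :: pvFrontGo t []
    else c :: pvFrontGo t vs

def pvSetP (p : List Char) (pr : Char × Int) : List Char := p.set pr.2.toNat pr.1

def pvStepA (p : List Char) (pr : Char × Int) : List Char :=
  match PySem.List.pop? p pr.2 with
  | some (_, rest) => PySem.List.insert rest pr.2 pr.1
  | none => p

theorem pvLowIdx_nonneg (l : List Char) : ∀ x ∈ pvLowIdx l, 0 ≤ x := by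
  induction l with
  | nil => simp [pvLowIdx]
  | cons c t ih =>
    intro x hx
    simp only [pvLowIdx] at hx
    split at hx <;> simp only [List.mem_cons, List.mem_map] at hx
    · rcases hx with rfl | ⟨y, hy, rfl⟩
      · omega
      · have := ih y hy; omega
    · rcases hx with ⟨y, hy, rfl⟩; have := ih y hy; omega

theorem pvLowIdx_lt (l : List Char) : ∀ x ∈ pvLowIdx l, x < (l.length : Int) := by
  induction l with
  | nil => simp [pvLowIdx]
  | cons c t ih =>
    intro x hx
    simp only [pvLowIdx] at hx
    split at hx <;> simp only [List.mem_cons, List.mem_map] at hx <;> simp only [List.length_cons]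
    · rcases hx with rfl | ⟨y, hy, rfl⟩
      · push_cast; omega
      · have := ih y hy; push_cast; omega
    · rcases hx with ⟨y, hy, rfl⟩; have := ih y hy; push_cast; omega

theorem pvLowIdx_pairwise (l : List Char) : (pvLowIdx l).Pairwise (fun x y => x < y) := by
  induction l with
  | nil => simp [pvLowIdx]
  | cons c t ih =>
    simp only [pvLowIdx]
    have hmap : ((pvLowIdx t).map (· + 1)).Pairwise (fun x y => x < y) := by
      rw [List.pairwise_map]; exact ih.imp (by omega)
    split
    · exact List.Pairwise.cons (by
        intro x hx
        simp only [List.mem_map] at hx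
        rcases hx with ⟨y, hy, rfl⟩
        have := pvLowIdx_nonneg t y hy; omega) hmap
    · exact hmap

theorem pvLength_lowIdx (l : List Char) :
    (pvLowIdx l).length = (l.filter (fun c => PySem.Chars.islower c)).length := by
  induction l with
  | nil => rfl
  | cons c t ih =>
    simp only [pvLowIdx, List.filter_cons]
    split <;> simp [ih]

-- loop 1: fold over enumerate builds the filtered letters and the lowercase indices
theorem pvEnumFold (l : List Char) : ∀ (s : Int) (a : List Char) (b : List Int),
    (PySem.List.enumerate l s).foldl
      (fun (acc : List Char × List Int) p =>
        if PySem.Chars.islower p.2 then (acc.1 ++ [p.2], acc.2 ++ [p.1]) else acc) (a, b)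
    = (a ++ l.filter (fun c => PySem.Chars.islower c), b ++ (pvLowIdx l).map (· + s)) := by
  induction l with
  | nil => intro s a b; simp [PySem.List.enumerate_nil, pvLowIdx]
  | cons c t ih =>
    intro s a b
    rw [PySem.List.enumerate_cons]
    simp only [List.foldl_cons, List.filter_cons, pvLowIdx]
    by_cases h : PySem.Chars.islower c
    · simp only [h, reduceIte]
      rw [ih]
      simp [List.map_map]
      intro x _
      omega
    · simp only [h, reduceIte, Bool.false_eq_true]
      rw [ih]
      simp [List.map_map]
      intro x _
      omega

-- generic: appending singletons in a fold is map
theorem pvFoldlAppend {α β : Type} (l : List α) (f : α → β) :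
    ∀ acc, l.foldl (fun acc x => acc ++ [f x]) acc = acc ++ l.map f := by
  induction l with
  | nil => simp
  | cons x t ih => intro acc; simp [List.foldl_cons, ih]

-- loop 2 builds the zip of the two lists
theorem pvRangeMapZip (a : List Char) (b : List Int) (h : a.length = b.length) :
    (PySem.List.pyRange 0 (PySem.List.len a) 1).map
        (fun i => (PySem.List.pyGetD a i ' ', PySem.List.pyGetD b i (0 : Int)))
      = a.zip b := by
  apply List.ext_getElem
  · simp [PySem.List.length_pyRange_one, h]
  · intro k h1 h2
    have hk : k < a.length := by simpa [PySem.List.length_pyRange_one] using h1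
    have hkb : k < b.length := h ▸ hk
    simp [PySem.List.getElem_pyRange_one, List.getD_eq_getElem?_getD, hk, hkb]

-- pop-then-insert at an in-range index is List.set
theorem pvStepA_eq_set (p : List Char) (pr : Char × Int) (h0 : 0 ≤ pr.2)
    (h1 : pr.2 < (p.length : Int)) : pvStepA p pr = pvSetP p pr := by
  obtain ⟨v, i⟩ := pr
  simp only at h0 h1
  have hi : i = ((i.toNat : Nat) : Int) := by omega
  have hlt : i.toNat < p.length := by omega
  have hlen : (p.take i.toNat).length = i.toNat := by
    simp [List.length_take, Nat.min_eq_left (le_of_lt hlt)]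
  unfold pvStepA pvSetP
  rw [hi, PySem.List.pop?_natCast _ _ hlt]
  simp only
  rw [PySem.List.insert_natCast _ _ _ (by
        rw [List.length_eraseIdx_of_lt hlt]; omega),
      List.eraseIdx_eq_take_drop_succ]
  have htake : ((p.take i.toNat ++ p.drop (i.toNat + 1)).take i.toNat) = p.take i.toNat :=
    List.take_left' hlen
  have hdrop : ((p.take i.toNat ++ p.drop (i.toNat + 1)).drop i.toNat) = p.drop (i.toNat + 1) :=
    List.drop_left' hlen
  rw [htake, hdrop]
  simp only [Int.toNat_natCast]
  exact (List.set_eq_take_cons_drop _ hlt).symm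

theorem pvFoldl_stepA_eq_set : ∀ (pairs : List (Char × Int)) (l : List Char),
    (∀ pr ∈ pairs, 0 ≤ pr.2 ∧ pr.2 < (l.length : Int)) →
    pairs.foldl pvStepA l = pairs.foldl pvSetP l := by
  intro pairs
  induction pairs with
  | nil => intro l _; rfl
  | cons a ps ih =>
    intro l hb
    have ha := hb a (List.mem_cons_self ..)
    simp only [List.foldl_cons]
    rw [pvStepA_eq_set l a ha.1 ha.2, ih]
    intro pr hpr
    have := hb pr (List.mem_cons_of_mem _ hpr)
    simpa [pvSetP] using this

theorem pvSetP_comm_fold : ∀ (pairs : List (Char × Int)) (p : List Char) (a : Char × Int),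
    (∀ pr ∈ pairs, a.2.toNat ≠ pr.2.toNat) →
    pairs.foldl pvSetP (pvSetP p a) = pvSetP (pairs.foldl pvSetP p) a := by
  intro pairs
  induction pairs with
  | nil => intro p a _; rfl
  | cons b ps ih =>
    intro p a h
    simp only [List.foldl_cons]
    have hba : a.2.toNat ≠ b.2.toNat := h b (List.mem_cons_self ..)
    have hc : pvSetP (pvSetP p a) b = pvSetP (pvSetP p b) a := by
      unfold pvSetP; exact List.set_comm _ _ hba
    rw [hc, ih _ _ (fun pr hpr => h pr (List.mem_cons_of_mem _ hpr))]

theorem pvFoldl_setP_reverse : ∀ (pairs : List (Char × Int)) (p : List Char),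
    pairs.Pairwise (fun x y => x.2.toNat ≠ y.2.toNat) →
    pairs.foldl pvSetP p = pairs.reverse.foldl pvSetP p := by
  intro pairs
  induction pairs with
  | nil => intro p _; rfl
  | cons a ps ih =>
    intro p h
    rw [List.pairwise_cons] at h
    simp only [List.reverse_cons, List.foldl_append, List.foldl_cons, List.foldl_nil]
    rw [← ih _ h.2, pvSetP_comm_fold ps p a h.1]

theorem pvShiftFold : ∀ (pairs : List (Char × Int)) (x : Char) (t : List Char),
    (∀ pr ∈ pairs, 0 ≤ pr.2) →
    (pairs.map (fun pr => (pr.1, pr.2 + 1))).foldl pvSetP (x :: t)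
      = x :: pairs.foldl pvSetP t := by
  intro pairs
  induction pairs with
  | nil => intro x t _; rfl
  | cons a ps ih =>
    intro x t h
    have ha := h a (List.mem_cons_self ..)
    simp only [List.map_cons, List.foldl_cons]
    have hset : pvSetP (x :: t) (a.1, a.2 + 1) = x :: pvSetP t a := by
      unfold pvSetP
      have hnat : (a.2 + 1).toNat = a.2.toNat + 1 := by omega
      rw [hnat]; rfl
    rw [hset, ih _ _ (fun pr hpr => h pr (List.mem_cons_of_mem _ hpr))]

-- main placement lemma: setting vs at the lowercase positions = pvFrontGo
theorem pvPlace : ∀ (l : List Char) (vs : List Char), vs.length = (pvLowIdx l).length →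
    (vs.zip (pvLowIdx l)).foldl pvSetP l = pvFrontGo l vs := by
  intro l
  induction l with
  | nil => intro vs _; simp [pvLowIdx, pvFrontGo]
  | cons c t ih =>
    intro vs hlen
    simp only [pvLowIdx, pvFrontGo] at *
    by_cases h : PySem.Chars.islower c
    · simp only [h, reduceIte] at hlen ⊢
      obtain ⟨v, vs', rfl⟩ : ∃ v vs', vs = v :: vs' := by
        cases vs with
        | nil => simp at hlen
        | cons v vs' => exact ⟨v, vs', rfl⟩
      simp only [List.zip_cons_cons, List.foldl_cons]
      have h0 : pvSetP (c :: t) (v, (0 : Int)) = v :: t := by unfold pvSetP; rfl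
      rw [h0, List.zip_map_right]
      rw [show (Prod.map id (· + (1:Int))) = (fun pr : Char × Int => (pr.1, pr.2 + 1)) from by
        funext pr; cases pr; rfl]
      rw [pvShiftFold _ v t (by
        intro pr hpr
        exact pvLowIdx_nonneg t _ (List.of_mem_zip hpr).2)]
      rw [ih vs' (by simpa using hlen)]
    · simp only [h, reduceIte, Bool.false_eq_true] at hlen ⊢
      rw [List.zip_map_right]
      rw [show (Prod.map id (· + (1:Int))) = (fun pr : Char × Int => (pr.1, pr.2 + 1)) from by
        funext pr; cases pr; rfl]
      rw [pvShiftFold _ c t (by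
        intro pr hpr
        exact pvLowIdx_nonneg t _ (List.of_mem_zip hpr).2)]
      rw [ih vs (by simpa using hlen)]

-- B's loop consumes the stack from the back = pvFrontGo on the reversed stack
theorem pvAltGo_eq_frontGo : ∀ (l : List Char) (stack : List Char),
    pvAltGo l stack = pvFrontGo l stack.reverse := by
  intro l
  induction l with
  | nil => intro stack; rfl
  | cons c t ih =>
    intro stack
    simp only [pvAltGo, pvFrontGo]
    by_cases h : PySem.Chars.islower c
    · simp only [h, reduceIte]
      rcases stack.eq_nil_or_concat with rfl | ⟨ys, y, rfl⟩
      · simp only [List.reverse_nil]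
        rw [show PySem.List.pop? ([] : List Char) (-1) = none from rfl]
        simp [ih]
      · simp only [List.concat_eq_append]
        rw [PySem.List.pop?_last]
        simp only [List.reverse_append, List.reverse_cons, List.reverse_nil, List.nil_append,
          List.cons_append, List.nil_append]
        rw [ih]
    · simp only [h, reduceIte, Bool.false_eq_true, ih]

theorem pvZipReverse : ∀ (a : List Char) (b : List Int), a.length = b.length →
    (a.zip b).reverse = a.reverse.zip b.reverse := by
  intro a
  induction a with
  | nil => intro b h; simp
  | cons x xs ih =>
    intro b h
    cases b with
    | nil => simp at h
    | cons y ys =>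
      simp only [List.length_cons] at h
      simp only [List.zip_cons_cons, List.reverse_cons]
      rw [ih ys (by omega), List.zip_append (by simp; omega)]
      rfl

-- the index list paired with the letters is duplicate-free (after .toNat)
theorem pvZipPairwise (ws : List Char) (ridx : List Int)
    (hlen : ws.length = ridx.length)
    (hpw : ridx.Pairwise (fun x y => x.toNat ≠ y.toNat)) :
    (ws.zip ridx).Pairwise (fun x y => x.2.toNat ≠ y.2.toNat) := by
  have hmap : (ws.zip ridx).map Prod.snd = ridx := List.map_snd_zip (le_of_eq hlen.symm)
  have := (List.pairwise_map (l := ws.zip ridx) (f := Prod.snd)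
    (R := fun x y => x.toNat ≠ y.toNat)).mp (by rw [hmap]; exact hpw)
  exact this

-- ===== VERDICT (by name: the statement is the Claim_ definition above) =====
theorem reverse_lower_spec : Claim_equal_reverse_lower := by
  intro s _
  unfold Spec_reverse_lower reverse_lower reverse_lower_alt
  set l := s.toList with hl
  simp only []
  rw [pvEnumFold l 0 [] []]
  simp only [List.nil_append]
  have hmap0 : (pvLowIdx l).map (· + (0 : Int)) = pvLowIdx l := by simp
  rw [hmap0]
  set ws := l.filter (fun c => PySem.Chars.islower c) with hws
  have hlenwi : ws.length = (pvLowIdx l).length := (pvLength_lowIdx l).symm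
  have hlenrev : ws.length = ((pvLowIdx l).reverse).length := by simpa using hlenwi
  rw [pvFoldlAppend, List.nil_append, pvRangeMapZip ws (pvLowIdx l).reverse hlenrev]
  refine congrArg String.ofList ?_
  show (PySem.List.pyRange 0 (PySem.List.len (ws.zip (pvLowIdx l).reverse)) 1).foldl
      (fun parse i => pvStepA parse (PySem.List.pyGetD (ws.zip (pvLowIdx l).reverse) i (' ', (0:Int)))) l
    = pvAltGo l ws
  rw [PySem.List.foldl_pyRange_zero_pyGetD (ws.zip (pvLowIdx l).reverse) (' ', (0:Int)) pvStepA l]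
  rw [pvFoldl_stepA_eq_set _ _ (by
    intro pr hpr
    have hmem : pr.2 ∈ pvLowIdx l := by
      have := (List.of_mem_zip hpr).2
      simpa using this
    exact ⟨pvLowIdx_nonneg l _ hmem, pvLowIdx_lt l _ hmem⟩)]
  have hpwrev : ((pvLowIdx l).reverse).Pairwise (fun x y => x.toNat ≠ y.toNat) := by
    rw [List.pairwise_reverse]
    have hpw := pvLowIdx_pairwise l
    refine hpw.imp_of_mem ?_
    intro a b ha hb hab
    have h0a := pvLowIdx_nonneg l a ha
    omega
  rw [pvFoldl_setP_reverse _ _ (pvZipPairwise ws _ hlenrev hpwrev)]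
  rw [pvZipReverse ws _ hlenrev, List.reverse_reverse]
  rw [pvPlace l ws.reverse (by simpa using hlenwi)]
  rw [pvAltGo_eq_frontGo l ws]
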